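-- pv_equiv track=rewrite | github.com/wzygxr/shuati | class103_MonotonicQueueOptimizedDP/Code13_CrowdedCows.py | solve
-- ===== SOURCE A (Python) =====
-- import collections
--
-- def solve(n, d, positions, values):
--     # 记录每个位置右边窗口内的最大值
--     right_max = [-1] * n
--
--     # 从右到左遍历，使用单调队列维护窗口内的最大值
--     deque = collections.deque()
--     for i in range(n-1, -1, -1):
--         # 移除队列中位置超出窗口的元素（x[j] > x[i] + d）
--         while deque and positions[deque[0]] > positions[i] + d:
--             deque.popleft()
--
--         # 如果队列不为空，当前位置的右边最大值就是队列头部的元素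
--         if deque:
--             right_max[i] = values[deque[0]]
--
--         # 维护队列的单调性，移除队列尾部小于等于当前元素的值
--         while deque and values[i] >= values[deque[-1]]:
--             deque.pop()
--         deque.append(i)
--
--     # 统计拥挤的奶牛数量
--     count = 0
--     deque.clear()
--
--     # 从左到右遍历，使用单调队列维护窗口内的最大值
--     for i in range(n):
--         # 移除队列中位置超出窗口的元素（x[j] < x[i] - d）
--         while deque and positions[deque[0]] < positions[i] - d:
--             deque.popleft()
--
--         # 如果左边有最大值且右边有最大值，并且都大于等于当前值，则是拥挤的奶牛
--         if deque and right_max[i] != -1 and values[deque[0]] >= values[i] and right_max[i] >= values[i]: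
--             count += 1
--
--         # 维护队列的单调性，移除队列尾部小于等于当前元素的值
--         while deque and values[i] >= values[deque[-1]]:
--             deque.pop()
--         deque.append(i)
--
--     return count
-- ===== SOURCE B (Python) =====
-- def solve(n, d, positions, values):
--     # Direct definition: cow i is crowded iff some earlier cow within distance d
--     # is at least as tall, and some later cow within distance d is at least as tall.
--     count = 0
--     for i in range(n):
--         v = values[i]
--         left = any(positions[j] >= positions[i] - d and values[j] >= v for j in range(i))
--         right = any(positions[j] <= positions[i] + d and values[j] >= v for j in range(i + 1, n))
--         if left and right:
--             count += 1
--     return count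
-- ===== Notes on version B (the rewrite author's own statement) =====
-- stated objective: simpler
-- what changed: Replaces A's two monotonic-deque sweeps and the right_max side array by a direct per-cow check that scans for an at-least-as-tall cow within distance d on each side.
-- intended difference: On inputs where some cow i has an at-least-as-tall cow within d on its left, a non-empty right window whose maximum value is exactly -1, and values[i] <= -1, A's -1 sentinel for 'no right neighbour' misreads that maximum as absence and A undercounts (returns fewer crowded cows), while B counts cow i, the intended answer. — e.g. on solve(3, 0, [0, 0, 0], [-1, -1, -1]): A returns 0, B returns 1
-- outside the precondition, e.g. on solve(5, 1, [3, 0, -3, -1, 1], [3, 3, 2, 3, 2]): A returns 0, B returns 1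
import Mathlib
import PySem

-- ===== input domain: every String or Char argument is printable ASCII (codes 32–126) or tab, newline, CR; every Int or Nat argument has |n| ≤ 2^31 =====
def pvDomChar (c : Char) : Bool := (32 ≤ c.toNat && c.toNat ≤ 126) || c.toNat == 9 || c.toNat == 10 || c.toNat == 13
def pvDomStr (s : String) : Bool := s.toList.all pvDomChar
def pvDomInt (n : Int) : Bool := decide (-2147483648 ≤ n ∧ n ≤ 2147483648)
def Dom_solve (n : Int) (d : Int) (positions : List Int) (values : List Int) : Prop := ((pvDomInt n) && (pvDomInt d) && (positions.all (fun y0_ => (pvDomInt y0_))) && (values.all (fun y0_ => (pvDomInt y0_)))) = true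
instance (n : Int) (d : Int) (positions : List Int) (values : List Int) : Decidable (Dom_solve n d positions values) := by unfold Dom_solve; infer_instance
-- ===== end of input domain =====

-- B replaces A's two monotonic-deque sweeps (plus the right_max side array) by a direct
-- per-cow scan for an at-least-as-tall cow within distance d on each side (simpler, not faster).
-- Indices produced by the loops are always in [0, n) inside Pre_solve, so plain `List.getD` is
-- exact for Python's `xs[i]` here.

-- Python's `xs[k]` for the in-range indices these programs produce (shared by port A and the
-- statement of D_solve below)
def gD (xs : List Int) (k : Nat) : Int := xs.getD k 0

-- ===== PORT A =====
-- one iteration domain note: `for i in range(n-1, -1, -1)` is ported as structural recursion on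
-- the fuel `i+1` (processing index i, then recursing); `while deque and …: popleft()` is
-- `List.dropWhile` at the head, and `while deque and …: pop()` is `dropWhile` on the reversed
-- list (the deque's back), reversed again.
def rightLoop (positions values : List Int) (d : Int) :
    Nat → List Nat → List Int → List Int
  | 0, _, rm => rm
  | i+1, dq, rm =>
    let dq1 := dq.dropWhile (fun j => decide (gD positions j > gD positions i + d))
    let rm1 := match dq1 with
      | [] => rm
      | j :: _ => rm.set i (gD values j)
    let dq2 := (dq1.reverse.dropWhile (fun j => decide (gD values i ≥ gD values j))).reverse
    rightLoop positions values d i (dq2 ++ [i]) rm1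

def leftStep (positions values rm : List Int) (d : Int) (st : List Nat × Int) (i : Nat) :
    List Nat × Int :=
  let dq1 := st.1.dropWhile (fun j => decide (gD positions j < gD positions i - d))
  let cnt1 := match dq1 with
    | [] => st.2
    | j :: _ =>
      if gD rm i ≠ -1 ∧ gD values j ≥ gD values i ∧ gD rm i ≥ gD values i
      then st.2 + 1 else st.2
  let dq2 := (dq1.reverse.dropWhile (fun j => decide (gD values i ≥ gD values j))).reverse
  (dq2 ++ [i], cnt1)

def solve (n : Int) (d : Int) (positions : List Int) (values : List Int) : Int :=
  let N := n.toNat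
  let rm := rightLoop positions values d N [] (List.replicate N (-1))
  ((List.range N).foldl (leftStep positions values rm d) ([], 0)).2

-- ===== PORT B =====
def solve_alt (n : Int) (d : Int) (positions : List Int) (values : List Int) : Int :=
  let N := n.toNat
  (List.range N).foldl (fun cnt i =>
    let p := positions.getD i 0
    let v := values.getD i 0
    let left := (List.range i).any
      (fun j => decide (positions.getD j 0 ≥ p - d) && decide (values.getD j 0 ≥ v))
    let right := (List.range' (i+1) (N - (i+1))).any
      (fun j => decide (positions.getD j 0 ≤ p + d) && decide (values.getD j 0 ≥ v))
    if left && right then cnt + 1 else cnt) 0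

-- ===== PRECONDITION & SPEC =====
-- Pre_solve excludes (i) inputs with n > len(positions) or n > len(values), on which A raises
-- IndexError, and (ii) inputs whose first n positions are not non-decreasing: the problem this
-- code solves guarantees sorted cow positions, and A's sliding-window deque logic is meaningless
-- (its value accidental) on unsorted input.
def Pre_solve (n : Int) (d : Int) (positions : List Int) (values : List Int) : Prop :=
  n ≤ (positions.length : Int) ∧ n ≤ (values.length : Int) ∧
  ∀ k < n.toNat, k + 1 < n.toNat → positions.getD k 0 ≤ positions.getD (k+1) 0
instance (n : Int) (d : Int) (positions : List Int) (values : List Int) :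
    Decidable (Pre_solve n d positions values) := by unfold Pre_solve; infer_instance

def pvWitness_solve : Int × Int × List Int × List Int := (3, 2, [1, 3, 5], [2, 9, 4])

-- On inputs where some cow i has an at-least-as-tall cow within d to its left, a non-empty right
-- window whose maximum value is exactly -1, and values[i] ≤ -1, A's `-1` sentinel for "no right
-- neighbour" misreads that right maximum as absence and skips cow i (undercounting), while B
-- counts cow i, the intended "crowded cow" answer.
def D_solve (n : Int) (d : Int) (positions : List Int) (values : List Int) : Prop :=
  let L := List.range (n.toNat ⊓ values.length)
  ∃ i ∈ L, ∃ j < i,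
    gD positions i - d ≤ gD positions j ∧
    gD values i ≤ gD values j ⊓ -1 ∧
    List.max? ((L.filter fun t =>
      i < t ∧ gD positions t ≤ gD positions i + d).map (gD values)) = some (-1)
instance (n : Int) (d : Int) (positions : List Int) (values : List Int) :
    Decidable (D_solve n d positions values) := by unfold D_solve; infer_instance

def Spec_solve (n : Int) (d : Int) (positions : List Int) (values : List Int) (out : Int) : Prop :=
  ¬ D_solve n d positions values → out = solve_alt n d positions values
instance (n : Int) (d : Int) (positions : List Int) (values : List Int) (out : Int) :
    Decidable (Spec_solve n d positions values out) := by unfold Spec_solve; infer_instance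

def pvDiffWitness_solve : Int × Int × List Int × List Int := (3, 0, [0, 0, 0], [-1, -1, -1])
def pvDiffWitnessOut_solve : Int × Int := (0, 1)

-- ===== CLAIM (what is proved, stated in full; the proofs are below) =====
def Claim_unchanged_solve : Prop := ∀ (n : Int) (d : Int) (positions : List Int) (values : List Int), Dom_solve n d positions values → Pre_solve n d positions values → Spec_solve n d positions values (solve n d positions values)
def Claim_changed_solve : Prop := Dom_solve (pvDiffWitness_solve.1) (pvDiffWitness_solve.2.1) (pvDiffWitness_solve.2.2.1) (pvDiffWitness_solve.2.2.2) ∧ Pre_solve (pvDiffWitness_solve.1) (pvDiffWitness_solve.2.1) (pvDiffWitness_solve.2.2.1) (pvDiffWitness_solve.2.2.2) ∧ D_solve (pvDiffWitness_solve.1) (pvDiffWitness_solve.2.1) (pvDiffWitness_solve.2.2.1) (pvDiffWitness_solve.2.2.2) ∧ solve (pvDiffWitness_solve.1) (pvDiffWitness_solve.2.1) (pvDiffWitness_solve.2.2.1) (pvDiffWitness_solve.2.2.2) = pvDiffWitnessOut_solve.1 ∧ solve_alt (pvDiffWitness_solve.1) (pvDiffWitness_solve.2.1) (pvDiffWitness_solve.2.2.1)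 (pvDiffWitness_solve.2.2.2) = pvDiffWitnessOut_solve.2 ∧ pvDiffWitnessOut_solve.1 ≠ pvDiffWitnessOut_solve.2
def Claim_exact_solve : Prop := ∀ (n : Int) (d : Int) (positions : List Int) (values : List Int), Dom_solve n d positions values → Pre_solve n d positions values → D_solve n d positions values → solve n d positions values ≠ solve_alt n d positions values

-- ===== LEMMAS AND PROOFS =====

-- first-n-sorted, as used by the proofs
abbrev SortedN (positions : List Int) (N : Nat) : Prop :=
  ∀ k < N, k + 1 < N → positions.getD k 0 ≤ positions.getD (k+1) 0

-- deque-membership conditions: CandR N f j = "index j would survive A's right-to-left deque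
-- entering the iteration of index f-1" (mutatis mutandis CandL for the left-to-right deque)
abbrev CandR (positions values : List Int) (d : Int) (f j : Nat) : Prop :=
  (∀ k < j, f ≤ k → values.getD k 0 < values.getD j 0) ∧
  (∀ m < j, f ≤ m → positions.getD j 0 ≤ positions.getD m 0 + d)

def CRl (positions values : List Int) (d : Int) (N f : Nat) : List Nat :=
  ((List.range' f (N - f)).reverse).filter (fun j => decide (CandR positions values d f j))

def readR (positions values : List Int) (d : Int) (N i : Nat) : List Nat :=
  (CRl positions values d N (i+1)).filter
    (fun j => decide (positions.getD j 0 ≤ positions.getD i 0 + d))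

def RMv (positions values : List Int) (d : Int) (N i : Nat) : Int :=
  match (readR positions values d N i).head? with
  | none => (-1 : Int)
  | some j => values.getD j 0

abbrev CandL (positions values : List Int) (d : Int) (i j : Nat) : Prop :=
  (∀ k < i, j < k → values.getD k 0 < values.getD j 0) ∧
  (∀ m < i, j < m → positions.getD m 0 - d ≤ positions.getD j 0)

def CLl (positions values : List Int) (d : Int) (i : Nat) : List Nat :=
  (List.range' 0 i).filter (fun j => decide (CandL positions values d i j))

def readL (positions values : List Int) (d : Int) (i : Nat) : List Nat :=
  (CLl positions values d i).filter
    (fun j => decide (positions.getD i 0 - d ≤ positions.getD j 0))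

abbrev LOKp (positions values : List Int) (d : Int) (i : Nat) : Prop :=
  ∃ j < i, positions.getD i 0 - d ≤ positions.getD j 0 ∧ values.getD i 0 ≤ values.getD j 0

abbrev CondA (positions values : List Int) (d : Int) (N i : Nat) : Prop :=
  LOKp positions values d i ∧ RMv positions values d N i ≠ -1 ∧
    values.getD i 0 ≤ RMv positions values d N i

abbrev CondB (positions values : List Int) (d : Int) (N i : Nat) : Prop :=
  LOKp positions values d i ∧
  ∃ j < N, i < j ∧ positions.getD j 0 ≤ positions.getD i 0 + d ∧
    values.getD i 0 ≤ values.getD j 0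

theorem sorted_mono (positions : List Int) (N : Nat) (hs : SortedN positions N) :
    ∀ a b : Nat, a ≤ b → b < N → positions.getD a 0 ≤ positions.getD b 0 := by
  intro a b hab hbN
  induction b, hab using Nat.le_induction with
  | base => exact le_refl _
  | succ b hab ih =>
    exact le_trans (ih (by omega)) (hs b (by omega) hbN)

theorem dropWhile_not_eq_filter {α : Type} (P : α → Bool) :
    ∀ l : List α, List.Pairwise (fun a b => P a = true → P b = true) l →
      l.dropWhile (fun x => !(P x)) = l.filter P := by
  intro l h
  induction l with
  | nil => rfl
  | cons a l ih =>
    rcases List.pairwise_cons.mp h with ⟨ha, htl⟩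
    cases hPa : P a with
    | true =>
      have : l.filter P = l := List.filter_eq_self.mpr (fun b hb => ha b hb hPa)
      simp [List.dropWhile_cons, hPa, List.filter_cons, this]
    | false =>
      simp only [List.dropWhile_cons, hPa, Bool.not_false, if_pos rfl, List.filter_cons,
        Bool.false_eq_true, if_false]
      exact ih htl

theorem revDropWhile_not_eq_filter {α : Type} (P : α → Bool) (l : List α)
    (h : List.Pairwise (fun a b => P b = true → P a = true) l) :
    (l.reverse.dropWhile (fun x => !(P x))).reverse = l.filter P := by
  have h' : List.Pairwise (fun a b => P a = true → P b = true) l.reverse :=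
    List.pairwise_reverse.mpr h
  rw [dropWhile_not_eq_filter P l.reverse h', List.filter_reverse, List.reverse_reverse]

theorem mem_CRl_iff (positions values : List Int) (d : Int) (N f j : Nat) (hf : f ≤ N) :
    j ∈ CRl positions values d N f ↔
      (f ≤ j ∧ j < N ∧ CandR positions values d f j) := by
  simp only [CRl, List.mem_filter, List.mem_reverse, List.mem_range'_1, decide_eq_true_eq]
  constructor
  · rintro ⟨⟨h1, h2⟩, h3⟩; exact ⟨h1, by omega, h3⟩
  · rintro ⟨h1, h2, h3⟩; exact ⟨⟨h1, by omega⟩, h3⟩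

theorem CRl_pairwise (positions values : List Int) (d : Int) (N f : Nat) (hf : f ≤ N) :
    (CRl positions values d N f).Pairwise
      (fun a b => b < a ∧ a < N ∧ b < N ∧ f ≤ a ∧ f ≤ b ∧
        CandR positions values d f a ∧ CandR positions values d f b) := by
  have h0 : (CRl positions values d N f).Pairwise (fun a b => b < a) := by
    refine List.Pairwise.sublist List.filter_sublist ?_
    exact List.pairwise_reverse.mpr (List.pairwise_lt_range' 1)
  refine h0.imp_of_mem ?_
  intro a b ha hb hr
  rcases (mem_CRl_iff positions values d N f a hf).mp ha with ⟨hfa, haN, hca⟩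
  rcases (mem_CRl_iff positions values d N f b hf).mp hb with ⟨hfb, hbN, hcb⟩
  exact ⟨hr, haN, hbN, hfa, hfb, hca, hcb⟩

theorem mem_readR_iff (positions values : List Int) (d : Int) (N i j : Nat) (hi : i < N) :
    j ∈ readR positions values d N i ↔
      (i < j ∧ j < N ∧ CandR positions values d (i+1) j ∧
        positions.getD j 0 ≤ positions.getD i 0 + d) := by
  simp only [readR, List.mem_filter, decide_eq_true_eq,
    mem_CRl_iff positions values d N (i+1) j (by omega)]
  constructor
  · rintro ⟨⟨h1, h2, h3⟩, h4⟩; exact ⟨by omega, h2, h3, h4⟩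
  · rintro ⟨h1, h2, h3, h4⟩; exact ⟨⟨by omega, h2, h3⟩, h4⟩

theorem readR_exists (positions values : List Int) (d : Int) (N i : Nat)
    (hs : SortedN positions N) (hi : i < N) :
    ∀ j, i < j → j < N → positions.getD j 0 ≤ positions.getD i 0 + d →
      ∃ j', j' ∈ readR positions values d N i ∧ values.getD j 0 ≤ values.getD j' 0 := by
  intro j
  induction j using Nat.strong_induction_on with
  | _ j IH =>
    intro hij hjN hw
    by_cases hc : CandR positions values d (i+1) j
    · exact ⟨j, (mem_readR_iff positions values d N i j hi).mpr ⟨hij, hjN, hc, hw⟩, le_refl _⟩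
    · have hpos : ∀ m < j, i+1 ≤ m → positions.getD j 0 ≤ positions.getD m 0 + d := by
        intro m hm him
        have h1 : positions.getD i 0 ≤ positions.getD m 0 :=
          sorted_mono positions N hs i m (by omega) (by omega)
        omega
      have hval : ¬ ∀ k < j, i+1 ≤ k → values.getD k 0 < values.getD j 0 := by
        intro hv; exact hc ⟨hv, hpos⟩
      push_neg at hval
      rcases hval with ⟨k, hkj, hik, hvk⟩
      have hwk : positions.getD k 0 ≤ positions.getD i 0 + d := by
        have := sorted_mono positions N hs k j (by omega) hjN
        omega
      rcases IH k hkj (by omega) (by omega) hwk with ⟨j', hj', hle⟩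
      exact ⟨j', hj', le_trans hvk hle⟩

-- head of the (post window-pop) right deque: a window member whose value bounds the window
theorem readR_head (positions values : List Int) (d : Int) (N i j0 : Nat) (t : List Nat)
    (hs : SortedN positions N) (hi : i < N)
    (h : readR positions values d N i = j0 :: t) :
    (i < j0 ∧ j0 < N ∧ positions.getD j0 0 ≤ positions.getD i 0 + d) ∧
    ∀ j, i < j → j < N → positions.getD j 0 ≤ positions.getD i 0 + d →
      values.getD j 0 ≤ values.getD j0 0 := by
  have hmem0 : j0 ∈ readR positions values d N i := by rw [h]; exact List.mem_cons_self
  rcases (mem_readR_iff positions values d N i j0 hi).mp hmem0 with ⟨hij0, hj0N, hc0, hw0⟩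
  refine ⟨⟨hij0, hj0N, hw0⟩, ?_⟩
  intro j hij hjN hwj
  rcases readR_exists positions values d N i hs hi j hij hjN hwj with ⟨j', hj', hle⟩
  rcases List.mem_cons.mp (h ▸ hj') with rfl | htl
  · exact hle
  · -- j' is behind the head j0, hence a smaller index with a smaller value
    have hpw : (readR positions values d N i).Pairwise (fun a b => b < a) := by
      refine List.Pairwise.sublist List.filter_sublist ?_
      exact (CRl_pairwise positions values d N (i+1) (by omega)).imp (fun hr => hr.1)
    have hj'0 : j' < j0 := by
      rw [h] at hpw
      exact (List.pairwise_cons.mp hpw).1 j' htl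
    rcases (mem_readR_iff positions values d N i j' hi).mp hj' with ⟨hij', hj'N, hc', hw'⟩
    exact le_trans hle (le_of_lt (hc0.1 j' hj'0 (by omega)))

theorem CRl_pop (positions values : List Int) (d : Int) (N i : Nat)
    (hs : SortedN positions N) (hi : i < N) :
    (CRl positions values d N (i+1)).dropWhile
        (fun j => decide (positions.getD j 0 > positions.getD i 0 + d)) =
      readR positions values d N i := by
  have hpred : (fun j : Nat => decide (positions.getD j 0 > positions.getD i 0 + d)) =
      (fun j : Nat => !(decide (positions.getD j 0 ≤ positions.getD i 0 + d))) := by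
    funext j
    rw [← decide_not]
    exact decide_eq_decide.mpr not_le.symm
  rw [hpred]
  exact dropWhile_not_eq_filter _ _
    ((CRl_pairwise positions values d N (i+1) (by omega)).imp (fun {a b} hr => by
      rcases hr with ⟨hba, haN, hbN, _, _, _, _⟩
      simp only [decide_eq_true_eq]
      intro hpa
      exact le_trans (sorted_mono positions N hs b a (by omega) haN) hpa))

theorem CRl_step (positions values : List Int) (d : Int) (N i : Nat)
    (hs : SortedN positions N) (hi : i < N) :
    ((readR positions values d N i).reverse.dropWhile
        (fun j => decide (values.getD i 0 ≥ values.getD j 0))).reverse ++ [i] =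
      CRl positions values d N i := by
  -- back-value-pop as a filter
  have hpred : (fun j : Nat => decide (values.getD i 0 ≥ values.getD j 0)) =
      (fun j : Nat => !(decide (values.getD i 0 < values.getD j 0))) := by
    funext j
    rw [← decide_not]
    exact decide_eq_decide.mpr not_lt.symm
  have hpw : (readR positions values d N i).Pairwise
      (fun a b => b < a ∧ i + 1 ≤ b ∧ CandR positions values d (i+1) a) := by
    refine List.Pairwise.sublist List.filter_sublist ?_
    exact (CRl_pairwise positions values d N (i+1) (by omega)).imp
      (fun hr => ⟨hr.1, hr.2.2.2.2.1, hr.2.2.2.2.2.1⟩)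
  rw [hpred, revDropWhile_not_eq_filter _ _ (hpw.imp (fun {a b} hr => by
    rcases hr with ⟨hba, hib, hca⟩
    simp only [decide_eq_true_eq]
    intro hb
    exact lt_trans hb (hca.1 b hba hib)))]
  -- both sides are filters of the same descending index list
  have hNi : N - i = (N - (i+1)) + 1 := by omega
  rw [CRl, hNi, List.range'_succ, List.reverse_cons, List.filter_append, readR, CRl,
    List.filter_filter, List.filter_filter]
  have hii : (List.filter (fun j => decide (CandR positions values d i j)) [i]) = [i] := by
    simp only [List.filter_cons, List.filter_nil, decide_eq_true_eq]
    rw [if_pos]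
    constructor
    · intro k hk hik; omega
    · intro m hm him; omega
  rw [hii]
  congr 1
  refine List.filter_congr ?_
  intro j hj
  have hjb : i + 1 ≤ j ∧ j < N := by
    rcases List.mem_reverse.mp hj with hj'
    rcases List.mem_range'_1.mp hj' with ⟨h1, h2⟩
    exact ⟨h1, by omega⟩
  rw [Bool.eq_iff_iff]
  simp only [Bool.and_eq_true, decide_eq_true_eq]
  constructor
  · rintro ⟨⟨hv, hw⟩, hc⟩
    constructor
    · intro k hk hik
      rcases Nat.eq_or_lt_of_le hik with rfl | hik'
      · exact hv
      · exact hc.1 k hk (by omega)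
    · intro m hm him
      rcases Nat.eq_or_lt_of_le him with rfl | him'
      · exact hw
      · exact hc.2 m hm (by omega)
  · rintro ⟨hv, hw⟩
    refine ⟨⟨?_, ?_⟩, ⟨?_, ?_⟩⟩
    · exact hv i (by omega) (le_refl i)
    · exact hw i (by omega) (le_refl i)
    · intro k hk hik; exact hv k hk (by omega)
    · intro m hm him; exact hw m hm (by omega)

-- the same pop/step equations in the ports' `gD` spelling (definitionally equal)
theorem CRl_popA (positions values : List Int) (d : Int) (N i : Nat)
    (hs : SortedN positions N) (hi : i < N) :
    (CRl positions values d N (i+1)).dropWhile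
        (fun j => decide (gD positions j > gD positions i + d)) =
      readR positions values d N i := CRl_pop positions values d N i hs hi

theorem CRl_stepA (positions values : List Int) (d : Int) (N i : Nat)
    (hs : SortedN positions N) (hi : i < N) :
    ((readR positions values d N i).reverse.dropWhile
        (fun j => decide (gD values i ≥ gD values j))).reverse ++ [i] =
      CRl positions values d N i := CRl_step positions values d N i hs hi

theorem rightLoop_spec (positions values : List Int) (d : Int) (N : Nat)
    (hs : SortedN positions N) :
    ∀ f, f ≤ N → ∀ rm : List Int, rm.length = N →
      (rightLoop positions values d f (CRl positions values d N f) rm).length = N ∧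
      (∀ t, t < N →
        (rightLoop positions values d f (CRl positions values d N f) rm).getD t 0 =
          if t < f then
            (match (readR positions values d N t).head? with
             | none => rm.getD t 0
             | some j => values.getD j 0)
          else rm.getD t 0) := by
  intro f
  induction f with
  | zero =>
    intro _ rm hlen
    refine ⟨by simpa [rightLoop] using hlen, ?_⟩
    intro t ht
    simp [rightLoop]
  | succ i ih =>
    intro hfN rm hlen
    have hi : i < N := by omega
    have hstep : rightLoop positions values d (i+1) (CRl positions values d N (i+1)) rm =
        rightLoop positions values d i (CRl positions values d N i)
          (match readR positions values d N i with
           | [] => rm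
           | j :: _ => rm.set i (values.getD j 0)) := by
      simp only [rightLoop, CRl_popA positions values d N i hs hi,
        CRl_stepA positions values d N i hs hi]
      rfl
    set rm1 : List Int := (match readR positions values d N i with
      | [] => rm
      | j :: _ => rm.set i (values.getD j 0)) with hrm1
    have hlen1 : rm1.length = N := by
      rw [hrm1]; cases readR positions values d N i <;> simp [hlen]
    have hne : ∀ t, t ≠ i → rm1.getD t 0 = rm.getD t 0 := by
      intro t hti
      rw [hrm1]; cases readR positions values d N i
      · rfl
      · rw [List.getD_eq_getElem?_getD, List.getD_eq_getElem?_getD, List.getElem?_set,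
          if_neg (fun h => hti (Eq.symm h))]
    have hat : rm1.getD i 0 = (match (readR positions values d N i).head? with
        | none => rm.getD i 0
        | some j => values.getD j 0) := by
      rw [hrm1]; cases readR positions values d N i
      · rfl
      · simp [List.getD_eq_getElem?_getD, List.getElem?_set, hlen, hi]
    rcases ih (by omega) rm1 hlen1 with ⟨hl2, hv2⟩
    rw [hstep]
    refine ⟨hl2, ?_⟩
    intro t ht
    rw [hv2 t ht]
    by_cases hti : t < i
    · rw [if_pos hti, if_pos (by omega)]
      cases (readR positions values d N t).head?
      · exact hne t (by omega)
      · rfl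
    · by_cases hteq : t = i
      · subst hteq
        rw [if_neg hti, if_pos (by omega)]
        exact hat
      · rw [if_neg hti, if_neg (by omega)]
        exact hne t hteq

theorem mem_CLl_iff (positions values : List Int) (d : Int) (i j : Nat) :
    j ∈ CLl positions values d i ↔ (j < i ∧ CandL positions values d i j) := by
  simp only [CLl, List.mem_filter, List.mem_range'_1, decide_eq_true_eq]
  constructor
  · rintro ⟨⟨_, h2⟩, h3⟩; exact ⟨by omega, h3⟩
  · rintro ⟨h1, h2⟩; exact ⟨⟨by omega, by omega⟩, h2⟩

theorem CLl_pairwise (positions values : List Int) (d : Int) (i : Nat) :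
    (CLl positions values d i).Pairwise
      (fun a b => a < b ∧ a < i ∧ b < i ∧
        CandL positions values d i a ∧ CandL positions values d i b) := by
  have h0 : (CLl positions values d i).Pairwise (fun a b => a < b) :=
    List.Pairwise.sublist List.filter_sublist (List.pairwise_lt_range' 1)
  refine h0.imp_of_mem ?_
  intro a b ha hb hr
  rcases (mem_CLl_iff positions values d i a).mp ha with ⟨hai, hca⟩
  rcases (mem_CLl_iff positions values d i b).mp hb with ⟨hbi, hcb⟩
  exact ⟨hr, hai, hbi, hca, hcb⟩

theorem mem_readL_iff (positions values : List Int) (d : Int) (i j : Nat) :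
    j ∈ readL positions values d i ↔
      (j < i ∧ CandL positions values d i j ∧
        positions.getD i 0 - d ≤ positions.getD j 0) := by
  simp only [readL, List.mem_filter, decide_eq_true_eq, mem_CLl_iff]
  tauto

theorem readL_exists (positions values : List Int) (d : Int) (N i : Nat)
    (hs : SortedN positions N) (hi : i < N) :
    ∀ j, j < i → positions.getD i 0 - d ≤ positions.getD j 0 →
      ∃ j', j' ∈ readL positions values d i ∧ values.getD j 0 ≤ values.getD j' 0 := by
  have key : ∀ m j, i - j ≤ m → j < i → positions.getD i 0 - d ≤ positions.getD j 0 →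
      ∃ j', j' ∈ readL positions values d i ∧ values.getD j 0 ≤ values.getD j' 0 := by
    intro m
    induction m with
    | zero => intro j h0 hji _; omega
    | succ m ihm =>
      intro j hm hji hw
      by_cases hc : CandL positions values d i j
      · exact ⟨j, (mem_readL_iff positions values d i j).mpr ⟨hji, hc, hw⟩, le_refl _⟩
      · have hpos : ∀ m' < i, j < m' → positions.getD m' 0 - d ≤ positions.getD j 0 := by
          intro m' hm' hjm'
          have h1 : positions.getD m' 0 ≤ positions.getD i 0 :=
            sorted_mono positions N hs m' i (by omega) hi
          omega
        have hval : ¬ ∀ k < i, j < k → values.getD k 0 < values.getD j 0 := by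
          intro hv; exact hc ⟨hv, hpos⟩
        push_neg at hval
        rcases hval with ⟨k, hki, hjk, hvk⟩
        have hwk : positions.getD i 0 - d ≤ positions.getD k 0 := by
          have := sorted_mono positions N hs j k (by omega) (by omega)
          omega
        rcases ihm k (by omega) hki hwk with ⟨j', hj', hle⟩
        exact ⟨j', hj', le_trans hvk hle⟩
  exact fun j hj hw => key i j (by omega) hj hw

theorem readL_head (positions values : List Int) (d : Int) (N i j0 : Nat) (t : List Nat)
    (hs : SortedN positions N) (hi : i < N)
    (h : readL positions values d i = j0 :: t) :
    (j0 < i ∧ positions.getD i 0 - d ≤ positions.getD j0 0) ∧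
    ∀ j, j < i → positions.getD i 0 - d ≤ positions.getD j 0 →
      values.getD j 0 ≤ values.getD j0 0 := by
  have hmem0 : j0 ∈ readL positions values d i := by rw [h]; exact List.mem_cons_self
  rcases (mem_readL_iff positions values d i j0).mp hmem0 with ⟨hj0i, hc0, hw0⟩
  refine ⟨⟨hj0i, hw0⟩, ?_⟩
  intro j hji hwj
  rcases readL_exists positions values d N i hs hi j hji hwj with ⟨j', hj', hle⟩
  rcases List.mem_cons.mp (h ▸ hj') with rfl | htl
  · exact hle
  · have hpw : (readL positions values d i).Pairwise (fun a b => a < b) := by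
      refine List.Pairwise.sublist List.filter_sublist ?_
      exact (CLl_pairwise positions values d i).imp (fun hr => hr.1)
    have hj'0 : j0 < j' := by
      rw [h] at hpw
      exact (List.pairwise_cons.mp hpw).1 j' htl
    rcases (mem_readL_iff positions values d i j').mp hj' with ⟨hj'i, hc', hw'⟩
    exact le_trans hle (le_of_lt (hc0.1 j' hj'i hj'0))

theorem CLl_pop (positions values : List Int) (d : Int) (N i : Nat)
    (hs : SortedN positions N) (hi : i < N) :
    (CLl positions values d i).dropWhile
        (fun j => decide (positions.getD j 0 < positions.getD i 0 - d)) =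
      readL positions values d i := by
  have hpred : (fun j : Nat => decide (positions.getD j 0 < positions.getD i 0 - d)) =
      (fun j : Nat => !(decide (positions.getD i 0 - d ≤ positions.getD j 0))) := by
    funext j
    rw [← decide_not]
    exact decide_eq_decide.mpr not_le.symm
  rw [hpred]
  exact dropWhile_not_eq_filter _ _
    ((CLl_pairwise positions values d i).imp (fun {a b} hr => by
      rcases hr with ⟨hab, hai, hbi, _, _⟩
      simp only [decide_eq_true_eq]
      intro hpa
      exact le_trans hpa (sorted_mono positions N hs a b (by omega) (by omega))))

theorem CLl_step (positions values : List Int) (d : Int) (N i : Nat)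
    (hs : SortedN positions N) (hi : i < N) :
    ((readL positions values d i).reverse.dropWhile
        (fun j => decide (values.getD i 0 ≥ values.getD j 0))).reverse ++ [i] =
      CLl positions values d (i+1) := by
  have hpred : (fun j : Nat => decide (values.getD i 0 ≥ values.getD j 0)) =
      (fun j : Nat => !(decide (values.getD i 0 < values.getD j 0))) := by
    funext j
    rw [← decide_not]
    exact decide_eq_decide.mpr not_lt.symm
  have hpw : (readL positions values d i).Pairwise
      (fun a b => a < b ∧ b < i ∧ CandL positions values d i a) := by
    refine List.Pairwise.sublist List.filter_sublist ?_
    exact (CLl_pairwise positions values d i).imp (fun hr => ⟨hr.1, hr.2.2.1, hr.2.2.2.1⟩)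
  rw [hpred, revDropWhile_not_eq_filter _ _ (hpw.imp (fun {a b} hr => by
    rcases hr with ⟨hab, hbi, hca⟩
    simp only [decide_eq_true_eq]
    intro hb
    exact lt_trans hb (hca.1 b hbi hab)))]
  simp only [readL, CLl, List.range'_1_concat, List.filter_append, List.filter_filter,
    Nat.zero_add]
  have hii : (List.filter (fun j => decide (CandL positions values d (i+1) j)) [i]) =
      [i] := by
    simp only [List.filter_cons, List.filter_nil, decide_eq_true_eq]
    rw [if_pos]
    constructor
    · intro k hk hik; omega
    · intro m hm him; omega
  rw [hii]
  congr 1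
  · refine List.filter_congr ?_
    intro j hj
    rcases List.mem_range'_1.mp hj with ⟨_, h2⟩
    have hji : j < i := by omega
    rw [Bool.eq_iff_iff]
    simp only [Bool.and_eq_true, decide_eq_true_eq, and_assoc]
    constructor
    · rintro ⟨hv, hw, hc1, hc2⟩
      constructor
      · intro k hk hjk
        by_cases hki : k = i
        · subst hki; exact hv
        · exact hc1 k (by omega) hjk
      · intro m hm hjm
        by_cases hmi : m = i
        · subst hmi; exact hw
        · exact hc2 m (by omega) hjm
    · rintro ⟨hv, hw⟩
      refine ⟨hv i (by omega) hji, hw i (by omega) hji, ?_, ?_⟩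
      · intro k hk hjk; exact hv k (by omega) hjk
      · intro m hm hjm; exact hw m (by omega) hjm

-- the left deque's head read answers exactly "is there an at-least-as-tall cow within d left of i"
theorem CLl_popA (positions values : List Int) (d : Int) (N i : Nat)
    (hs : SortedN positions N) (hi : i < N) :
    (CLl positions values d i).dropWhile
        (fun j => decide (gD positions j < gD positions i - d)) =
      readL positions values d i := CLl_pop positions values d N i hs hi

theorem CLl_stepA (positions values : List Int) (d : Int) (N i : Nat)
    (hs : SortedN positions N) (hi : i < N) :
    ((readL positions values d i).reverse.dropWhile
        (fun j => decide (gD values i ≥ gD values j))).reverse ++ [i] =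
      CLl positions values d (i+1) := CLl_step positions values d N i hs hi

theorem readL_cond (positions values : List Int) (d : Int) (N i : Nat)
    (hs : SortedN positions N) (hi : i < N) :
    (readL positions values d i = [] → ¬ LOKp positions values d i) ∧
    (∀ j0 t, readL positions values d i = j0 :: t →
      (LOKp positions values d i ↔ values.getD i 0 ≤ values.getD j0 0)) := by
  constructor
  · intro hnil hlok
    rcases hlok with ⟨j, hji, hw, _⟩
    rcases readL_exists positions values d N i hs hi j hji hw with ⟨j', hj', _⟩
    rw [hnil] at hj'
    exact absurd hj' (List.not_mem_nil)
  · intro j0 t h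
    rcases readL_head positions values d N i j0 t hs hi h with ⟨⟨hj0i, hw0⟩, hmax⟩
    constructor
    · rintro ⟨j, hji, hw, hv⟩
      exact le_trans hv (hmax j hji hw)
    · intro hv
      exact ⟨j0, hj0i, hw0, hv⟩

theorem leftFold_spec (positions values rm : List Int) (d : Int) (N : Nat)
    (hs : SortedN positions N)
    (hrm : ∀ t, t < N → rm.getD t 0 = RMv positions values d N t) :
    ∀ k i cnt, i + k ≤ N →
      (List.range' i k).foldl (leftStep positions values rm d)
          (CLl positions values d i, cnt) =
        (CLl positions values d (i+k),
          cnt + ((List.range' i k).countP (fun t => decide (CondA positions values d N t)))) := by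
  intro k
  induction k with
  | zero => intro i cnt _; simp
  | succ k ih =>
    intro i cnt hik
    have hi : i < N := by omega
    rw [List.range'_succ, List.foldl_cons]
    have hstep : leftStep positions values rm d (CLl positions values d i, cnt) i =
        (CLl positions values d (i+1),
         cnt + if decide (CondA positions values d N i) = true then 1 else 0) := by
      simp only [leftStep, CLl_popA positions values d N i hs hi,
        CLl_stepA positions values d N i hs hi]
      rcases hR : readL positions values d i with _ | ⟨j0, tl⟩
      · have hA : ¬ CondA positions values d N i := by
          intro hA
          exact (readL_cond positions values d N i hs hi).1 hR hA.1
        simp [hA]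
      · have hiff := (readL_cond positions values d N i hs hi).2 j0 tl hR
        have hgd : gD rm i = RMv positions values d N i := hrm i hi
        have hred : (match j0 :: tl with
            | [] => cnt
            | j :: _ =>
              if gD rm i ≠ -1 ∧ gD values j ≥ gD values i ∧ gD rm i ≥ gD values i
              then cnt + 1 else cnt) =
            (if gD rm i ≠ -1 ∧ gD values j0 ≥ gD values i ∧ gD rm i ≥ gD values i
              then cnt + 1 else cnt) := rfl
        rw [hred]
        by_cases hA : CondA positions values d N i
        · have hc : gD rm i ≠ -1 ∧ gD values j0 ≥ gD values i ∧ gD rm i ≥ gD values i := by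
            rw [hgd]
            exact ⟨hA.2.1, hiff.mp hA.1, hA.2.2⟩
          rw [if_pos hc, if_pos (decide_eq_true hA)]
        · have hc : ¬ (gD rm i ≠ -1 ∧ gD values j0 ≥ gD values i ∧ gD rm i ≥ gD values i) := by
            rw [hgd]
            rintro ⟨h1, h2, h3⟩
            exact hA ⟨hiff.mpr h2, h1, h3⟩
          rw [if_neg hc, if_neg (by simpa using hA)]
          simp
    rw [hstep, ih (i+1) _ (by omega)]
    have hik' : i + 1 + k = i + (k + 1) := by omega
    rw [hik', List.countP_cons]
    refine congrArg _ ?_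
    by_cases hA : CondA positions values d N i <;> simp [hA] <;> push_cast <;> ring

theorem foldl_ite_count {α : Type} (P : α → Bool) :
    ∀ (l : List α) (c : Int),
      l.foldl (fun cnt x => if P x then cnt + 1 else cnt) c = c + l.countP P := by
  intro l
  induction l with
  | nil => intro c; simp
  | cons a l ih =>
    intro c
    rw [List.foldl_cons, ih, List.countP_cons]
    cases hPa : P a <;> simp [hPa] <;> push_cast <;> ring

theorem countP_lt {α : Type} (p q : α → Bool) :
    ∀ (l : List α), (∀ x ∈ l, p x = true → q x = true) →
      ∀ x0 ∈ l, q x0 = true → p x0 ≠ true → l.countP p < l.countP q := by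
  intro l
  induction l with
  | nil => intro _ x0 hx0; exact absurd hx0 (List.not_mem_nil)
  | cons a l ih =>
    intro hmono x0 hx0 hq hp
    have hmono' : ∀ x ∈ l, p x = true → q x = true :=
      fun x hx => hmono x (List.mem_cons_of_mem a hx)
    rw [List.countP_cons, List.countP_cons]
    rcases List.mem_cons.mp hx0 with rfl | hx0'
    · have h1 : l.countP p ≤ l.countP q := List.countP_mono_left hmono'
      rw [if_neg (by simpa using hp), if_pos hq]
      omega
    · have h1 : l.countP p < l.countP q := ih hmono' x0 hx0' hq hp
      have h2 : (if p a = true then 1 else 0) ≤ (if q a = true then 1 else 0) := by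
        by_cases hpa : p a = true
        · rw [if_pos hpa, if_pos (hmono a List.mem_cons_self hpa)]
        · rw [if_neg hpa]; omega
      omega

theorem solve_eq_countP (n d : Int) (positions values : List Int)
    (hp : Pre_solve n d positions values) :
    solve n d positions values =
      ((List.range n.toNat).countP
        (fun i => decide (CondA positions values d n.toNat i)) : Int) := by
  rcases hp with ⟨-, -, hs⟩
  have hs' : SortedN positions n.toNat := hs
  have h0 : CRl positions values d n.toNat n.toNat = [] := by
    simp [CRl, Nat.sub_self]
  obtain ⟨hlF, hvF⟩ := rightLoop_spec positions values d n.toNat hs' n.toNat (le_refl _)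
    (List.replicate n.toNat (-1)) (by simp)
  rw [h0] at hvF
  have hrm : ∀ t, t < n.toNat →
      (rightLoop positions values d n.toNat [] (List.replicate n.toNat (-1))).getD t 0 =
        RMv positions values d n.toNat t := by
    intro t ht
    rw [hvF t ht, if_pos ht]
    cases hh : (readR positions values d n.toNat t).head? <;>
      simp [RMv, hh, List.getElem?_replicate, ht]
  have h1 : CLl positions values d 0 = [] := by simp [CLl]
  have hmain := leftFold_spec positions values
    (rightLoop positions values d n.toNat [] (List.replicate n.toNat (-1))) d n.toNat hs' hrm
    n.toNat 0 0 (by omega)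
  rw [h1] at hmain
  simp only [solve, List.range_eq_range', hmain]
  simp

theorem solve_alt_eq_countP (n d : Int) (positions values : List Int) :
    solve_alt n d positions values =
      ((List.range n.toNat).countP
        (fun i => decide (CondB positions values d n.toNat i)) : Int) := by
  simp only [solve_alt]
  rw [foldl_ite_count]
  rw [List.countP_congr (q := fun i => decide (CondB positions values d n.toNat i)) ?_]
  · simp
  · intro i hi
    have hiN : i < n.toNat := List.mem_range.mp hi
    simp only [List.any_eq_true, List.mem_range, List.mem_range'_1, Bool.and_eq_true,
      decide_eq_true_eq]
    constructor
    · rintro ⟨⟨jl, hjl, hpl, hvl⟩, ⟨jr, ⟨hjr1, hjr2⟩, hpr, hvr⟩⟩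
      exact ⟨⟨jl, hjl, by omega, hvl⟩, ⟨jr, by omega, by omega, hpr, hvr⟩⟩
    · rintro ⟨⟨jl, hjl, hpl, hvl⟩, ⟨jr, hjrN, hijr, hpr, hvr⟩⟩
      exact ⟨⟨jl, hjl, by omega, hvl⟩, ⟨jr, ⟨by omega, by omega⟩, hpr, hvr⟩⟩

-- per-index comparison of A's and B's counting conditions
theorem cond_compare (positions values : List Int) (d : Int) (N i : Nat)
    (hs : SortedN positions N) (hi : i < N) :
    (CondA positions values d N i → CondB positions values d N i) ∧
    (¬ (values.getD i 0 ≤ -1 ∧ LOKp positions values d i ∧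
          (∃ j < N, i < j ∧ positions.getD j 0 ≤ positions.getD i 0 + d ∧
            values.getD j 0 = -1) ∧
          (∀ j < N, i < j → positions.getD j 0 ≤ positions.getD i 0 + d →
            values.getD j 0 ≤ -1)) →
        (CondB positions values d N i → CondA positions values d N i)) ∧
    ((values.getD i 0 ≤ -1 ∧ LOKp positions values d i ∧
          (∃ j < N, i < j ∧ positions.getD j 0 ≤ positions.getD i 0 + d ∧
            values.getD j 0 = -1) ∧
          (∀ j < N, i < j → positions.getD j 0 ≤ positions.getD i 0 + d →
            values.getD j 0 ≤ -1)) →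
        (CondB positions values d N i ∧ ¬ CondA positions values d N i)) := by
  rcases hR : readR positions values d N i with _ | ⟨j0, tl⟩
  · have hRM : RMv positions values d N i = -1 := by simp [RMv, hR]
    have hnoW : ∀ j, i < j → j < N → ¬ (positions.getD j 0 ≤ positions.getD i 0 + d) := by
      intro j hij hjN hw
      rcases readR_exists positions values d N i hs hi j hij hjN hw with ⟨j', hj', _⟩
      rw [hR] at hj'
      exact absurd hj' List.not_mem_nil
    refine ⟨?_, ?_, ?_⟩
    · rintro ⟨_, hne, _⟩; exact absurd hRM hne
    · rintro - ⟨hL, j, hjN, hij, hw, hv⟩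
      exact absurd hw (hnoW j hij hjN)
    · rintro ⟨_, _, ⟨j, hjN, hij, hw, _⟩, _⟩
      exact absurd hw (hnoW j hij hjN)
  · rcases readR_head positions values d N i j0 tl hs hi hR with ⟨⟨hij0, hj0N, hw0⟩, hmax⟩
    have hRM : RMv positions values d N i = values.getD j0 0 := by simp [RMv, hR]
    refine ⟨?_, ?_, ?_⟩
    · rintro ⟨hL, hne, hle⟩
      exact ⟨hL, j0, hj0N, hij0, hw0, hRM ▸ hle⟩
    · rintro hnd ⟨hL, j, hjN, hij, hw, hv⟩
      have hle : values.getD i 0 ≤ values.getD j0 0 := le_trans hv (hmax j hij hjN hw)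
      by_cases hm1 : values.getD j0 0 = -1
      · exfalso
        apply hnd
        refine ⟨by omega, hL, ⟨j0, hj0N, hij0, hw0, hm1⟩, ?_⟩
        intro j' hj'N hij' hw'
        have := hmax j' hij' hj'N hw'
        omega
      · exact ⟨hL, by rw [hRM]; exact hm1, hRM ▸ hle⟩
    · rintro ⟨hvi, hL, ⟨j, hjN, hij, hw, hvj⟩, hall⟩
      have h1 : values.getD j0 0 ≤ -1 := hall j0 hj0N hij0 hw0
      have h2 : -1 ≤ values.getD j0 0 := by
        rw [← hvj]
        exact hmax j hij hjN hw
      refine ⟨⟨hL, j0, hj0N, hij0, hw0, by omega⟩, ?_⟩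
      rintro ⟨_, hne, _⟩
      rw [hRM] at hne
      omega

theorem Dright_iff (positions values : List Int) (d : Int) (N i : Nat) (hi : i < N) :
    ((((List.range N).filter
        (fun t => i < t ∧ positions.getD t 0 ≤ positions.getD i 0 + d)).map
      (values.getD · 0)).max? = some (-1)) ↔
    ((∃ j < N, i < j ∧ positions.getD j 0 ≤ positions.getD i 0 + d ∧ values.getD j 0 = -1) ∧
     (∀ j < N, i < j → positions.getD j 0 ≤ positions.getD i 0 + d → values.getD j 0 ≤ -1)) := by
  rw [List.max?_eq_some_iff]
  constructor
  · rintro ⟨hmem, hall⟩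
    rcases List.mem_map.mp hmem with ⟨t, htf, htv⟩
    rcases List.mem_filter.mp htf with ⟨htr, htw⟩
    rcases of_decide_eq_true htw with ⟨hti, htw'⟩
    refine ⟨⟨t, List.mem_range.mp htr, hti, htw', htv⟩, ?_⟩
    intro j hjN hij hjw
    exact hall _ (List.mem_map.mpr ⟨j, List.mem_filter.mpr
      ⟨List.mem_range.mpr hjN, decide_eq_true ⟨hij, hjw⟩⟩, rfl⟩)
  · rintro ⟨⟨j, hjN, hij, hjw, hjv⟩, hall⟩
    refine ⟨List.mem_map.mpr ⟨j, List.mem_filter.mpr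
      ⟨List.mem_range.mpr hjN, decide_eq_true ⟨hij, hjw⟩⟩, hjv⟩, ?_⟩
    intro b hb
    rcases List.mem_map.mp hb with ⟨t, htf, rfl⟩
    rcases List.mem_filter.mp htf with ⟨htr, htw⟩
    rcases of_decide_eq_true htw with ⟨hti, htw'⟩
    exact hall t (List.mem_range.mp htr) hti htw' 

theorem D_iff (n d : Int) (positions values : List Int)
    (hlen : n.toNat ≤ values.length) :
    D_solve n d positions values ↔
    ∃ i < n.toNat,
      (values.getD i 0 ≤ -1 ∧ LOKp positions values d i ∧
        (∃ j < n.toNat, i < j ∧ positions.getD j 0 ≤ positions.getD i 0 + d ∧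
          values.getD j 0 = -1) ∧
        (∀ j < n.toNat, i < j → positions.getD j 0 ≤ positions.getD i 0 + d →
          values.getD j 0 ≤ -1)) := by
  unfold D_solve
  have hM : n.toNat ⊓ values.length = n.toNat := by omega
  simp only [gD, hM, List.mem_range]
  constructor
  · rintro ⟨i, hiN, j, hji, h2, hmin, h4⟩
    rcases le_inf_iff.mp hmin with ⟨h3, h1⟩
    rcases (Dright_iff positions values d n.toNat i hiN).mp h4 with ⟨hex, hall⟩
    exact ⟨i, hiN, h1, ⟨j, hji, h2, h3⟩, hex, hall⟩
  · rintro ⟨i, hiN, h1, ⟨j, hji, hw, hv⟩, hex, hall⟩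
    exact ⟨i, hiN, j, hji, hw, le_inf_iff.mpr ⟨hv, h1⟩,
      (Dright_iff positions values d n.toNat i hiN).mpr ⟨hex, hall⟩⟩

-- ===== VERDICT (by name: the statement is the Claim_ definition above) =====
theorem solve_spec : Claim_unchanged_solve := by
  intro n d positions values hdom hpre
  unfold Spec_solve
  intro hnd
  have hs : SortedN positions n.toNat := hpre.2.2
  rw [solve_eq_countP n d positions values hpre, solve_alt_eq_countP]
  congr 1
  apply List.countP_congr
  intro i hi
  have hiN : i < n.toNat := List.mem_range.mp hi
  have hnd' := fun hb => hnd ((D_iff n d positions values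
    (Int.toNat_le.mpr hpre.2.1)).mpr ⟨i, hiN, hb⟩)
  obtain ⟨ha, hb, -⟩ := cond_compare positions values d n.toNat i hs hiN
  simp only [decide_eq_true_eq]
  exact ⟨ha, hb hnd'⟩

theorem solve_changed : Claim_changed_solve := by
  unfold Claim_changed_solve; decide

theorem solve_tight : Claim_exact_solve := by
  intro n d positions values hdom hpre hd
  have hs : SortedN positions n.toNat := hpre.2.2
  obtain ⟨i, hiN, hbody⟩ := (D_iff n d positions values
    (Int.toNat_le.mpr hpre.2.1)).mp hd
  rw [solve_eq_countP n d positions values hpre, solve_alt_eq_countP]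
  obtain ⟨-, -, hc⟩ := cond_compare positions values d n.toNat i hs hiN
  obtain ⟨hB, hnA⟩ := hc hbody
  have hlt : (List.range n.toNat).countP (fun t => decide (CondA positions values d n.toNat t)) <
      (List.range n.toNat).countP (fun t => decide (CondB positions values d n.toNat t)) := by
    refine countP_lt _ _ (List.range n.toNat) ?_ i (List.mem_range.mpr hiN)
      (decide_eq_true hB) (by simpa using hnA)
    intro x hx hpx
    exact decide_eq_true
      ((cond_compare positions values d n.toNat x hs (List.mem_range.mp hx)).1
        (of_decide_eq_true hpx))
  exact ne_of_lt (by exact_mod_cast hlt)
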